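-- pv_equiv track=rewrite | github.com/abhijitkumar4293/SmallLanguageModel | tokenizer/tokenizer_bpe.py | merge_pair_in_word
-- ===== SOURCE A (Python) =====
-- from typing import Dict, List, Tuple, Iterable, Optional
--
-- def merge_pair_in_word(word: Tuple[int, ...], pair: Tuple[int, int], new_symbol: int) -> Tuple[int, ...]:
--     """
--     Replace occurrences of a given adjacent pair in a single word with new_symbol.
--
--     Example:
--       word = (97, 98, 99, 98)   # a b c b
--       pair = (98, 99)           # b c
--       new_symbol = 300
--
--       => (97, 300, 98)
--     """
--     a, b = pair
--     out: List[int] = []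
--     i = 0
--
--     while i < len(word):
--         # If we see the pair at positions i and i+1, merge it.
--         if i < len(word) - 1 and word[i] == a and word[i + 1] == b:
--             out.append(new_symbol)
--             i += 2  # skip both symbols
--         else:
--             out.append(word[i])
--             i += 1
--
--     return tuple(out)
-- ===== SOURCE B (Python) =====
-- def merge_pair_in_word(word, pair, new_symbol):
--     a, b = pair
--     out = []
--     i = 0
--     n = len(word)
--     while True:
--         try:
--             j = word.index(a, i)
--         except ValueError:
--             out.extend(word[i:])
--             break
--         out.extend(word[i:j])
--         if j < n - 1 and word[j + 1] == b:
--             out.append(new_symbol)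
--             i = j + 2
--         else:
--             out.append(word[j])
--             i = j + 1
--     return tuple(out)
-- ===== Notes on version B (the rewrite author's own statement) =====
-- stated objective: alternative
-- what changed: B replaces A's one-symbol-at-a-time while loop by a find-and-skip traversal: it jumps with word.index(a, i) to the next possible match, copies the untouched slice in bulk, and only inspects the pair at that position.
import Mathlib
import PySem

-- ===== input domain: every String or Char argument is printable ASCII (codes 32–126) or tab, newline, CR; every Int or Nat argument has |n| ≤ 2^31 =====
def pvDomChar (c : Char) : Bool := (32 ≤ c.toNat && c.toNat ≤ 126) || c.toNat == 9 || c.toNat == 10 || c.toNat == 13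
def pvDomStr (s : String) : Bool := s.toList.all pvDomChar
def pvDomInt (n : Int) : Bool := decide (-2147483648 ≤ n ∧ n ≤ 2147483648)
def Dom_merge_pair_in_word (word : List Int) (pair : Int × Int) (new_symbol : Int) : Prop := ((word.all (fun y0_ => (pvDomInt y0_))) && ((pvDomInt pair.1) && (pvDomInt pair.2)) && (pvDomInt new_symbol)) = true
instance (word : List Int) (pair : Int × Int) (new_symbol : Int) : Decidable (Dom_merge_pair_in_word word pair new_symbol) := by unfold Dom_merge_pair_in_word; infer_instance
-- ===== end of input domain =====

-- B walks the word with find-and-skip (next occurrence of the pair's first symbol, bulk slice copy)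
-- instead of A's symbol-by-symbol while loop; same O(n) cost, different traversal (objective: alternative).

-- ===== PORT A =====
-- A's while loop: i steps by 1 or 2, out accumulates appended symbols.
def pvLoopA (word : List Int) (a b new_symbol : Int) (i : Nat) (out : List Int) : List Int :=
  if _h : i < word.length then
    if i < word.length - 1 ∧ word.getD i 0 = a ∧ word.getD (i+1) 0 = b then
      pvLoopA word a b new_symbol (i+2) (out ++ [new_symbol])
    else
      pvLoopA word a b new_symbol (i+1) (out ++ [word.getD i 0])
  else out
termination_by word.length - i

def merge_pair_in_word (word : List Int) (pair : Int × Int) (new_symbol : Int) : List Int :=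
  pvLoopA word pair.1 pair.2 new_symbol 0 []

-- ===== PORT B =====
-- hand port of tuple.index(a, i): first index j ≥ i with word[j] = a, none = ValueError (exact).
def pvIndexFrom (word : List Int) (a : Int) (i : Nat) : Option Nat :=
  if _h : i < word.length then
    if word.getD i 0 = a then some i else pvIndexFrom word a (i+1)
  else none
termination_by word.length - i

theorem pvIndexFrom_bounds (word : List Int) (a : Int) (i j : Nat)
    (h : pvIndexFrom word a i = some j) : i ≤ j ∧ j < word.length := by
  fun_induction pvIndexFrom word a i with
  | case1 i hi heq => simp_all
  | case2 i hi heq ih =>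
    have := ih h; omega
  | case3 i hi => simp_all

-- B's while True loop: jump to the next occurrence of a, bulk-copy the untouched slice.
def pvLoopB (word : List Int) (a b new_symbol : Int) (i : Nat) (out : List Int) : List Int :=
  match hj : pvIndexFrom word a i with
  | none => out ++ word.drop i
  | some j =>
    let out' := out ++ (word.drop i).take (j - i)
    if j < word.length - 1 ∧ word.getD (j+1) 0 = b then
      pvLoopB word a b new_symbol (j+2) (out' ++ [new_symbol])
    else
      pvLoopB word a b new_symbol (j+1) (out' ++ [word.getD j 0])
termination_by word.length - i
decreasing_by
  · have := pvIndexFrom_bounds word a i j hj; omega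
  · have := pvIndexFrom_bounds word a i j hj; omega

def merge_pair_in_word_alt (word : List Int) (pair : Int × Int) (new_symbol : Int) : List Int :=
  pvLoopB word pair.1 pair.2 new_symbol 0 []

-- ===== PRECONDITION & SPEC =====
def Spec_merge_pair_in_word (word : List Int) (pair : Int × Int) (new_symbol : Int) (out : List Int) : Prop := out = merge_pair_in_word_alt word pair new_symbol
instance (word : List Int) (pair : Int × Int) (new_symbol : Int) (out : List Int) : Decidable (Spec_merge_pair_in_word word pair new_symbol out) := by unfold Spec_merge_pair_in_word; infer_instance

-- ===== CLAIM (what is proved, stated in full; the proofs are below) =====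
def Claim_equal_merge_pair_in_word : Prop := ∀ (word : List Int) (pair : Int × Int) (new_symbol : Int), Dom_merge_pair_in_word word pair new_symbol → Spec_merge_pair_in_word word pair new_symbol (merge_pair_in_word word pair new_symbol)

-- ===== LEMMAS AND PROOFS =====
theorem t1 (l : List Int) (i : Nat) (h : i < l.length) : l.drop i = l.getD i 0 :: l.drop (i+1) := by
  rw [List.getD_eq_getElem l 0 h]
  exact List.drop_eq_getElem_cons h

theorem t2 (l : List Int) (i j : Nat) (h : i < l.length) (hij : i < j) :
    (l.drop i).take (j - i) = l.getD i 0 :: (l.drop (i+1)).take (j - (i+1)) := by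
  rw [t1 l i h, show j - i = (j - (i+1)) + 1 by omega]
  rfl

theorem pvLoopB_skip (word : List Int) (a b ns : Int) (i : Nat) (out : List Int)
    (hi : i < word.length) (hne : word.getD i 0 ≠ a) :
    pvLoopB word a b ns i out = pvLoopB word a b ns (i+1) (out ++ [word.getD i 0]) := by
  have hidx : pvIndexFrom word a i = pvIndexFrom word a (i+1) := by
    rw [pvIndexFrom, dif_pos hi, if_neg hne]
  rw [pvLoopB.eq_def, pvLoopB.eq_def, hidx]
  cases hj : pvIndexFrom word a (i+1) with
  | none => simp [t1 word i hi]
  | some j =>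
    have hjb := pvIndexFrom_bounds word a (i+1) j hj
    simp only [t2 word i j hi (by omega), List.append_assoc, List.singleton_append]

theorem loops_eq (word : List Int) (a b ns : Int) (n : Nat) :
    ∀ i out, word.length - i ≤ n →
    pvLoopA word a b ns i out = pvLoopB word a b ns i out := by
  induction n with
  | zero =>
    intro i out hn
    have hi : ¬ i < word.length := by omega
    have hf : pvIndexFrom word a i = none := by rw [pvIndexFrom, dif_neg hi]
    rw [pvLoopA.eq_def, pvLoopB.eq_def, hf]
    simp [hi, List.drop_eq_nil_of_le (by omega : word.length ≤ i)]
  | succ n ih =>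
    intro i out hn
    by_cases hi : i < word.length
    · by_cases ha : word.getD i 0 = a
      · have hf : pvIndexFrom word a i = some i := by rw [pvIndexFrom, dif_pos hi, if_pos ha]
        rw [pvLoopA.eq_def, pvLoopB.eq_def, hf]
        by_cases hc : i < word.length - 1 ∧ word.getD (i+1) 0 = b
        · simp only [hi, dif_pos, if_pos (And.intro hc.1 (And.intro ha hc.2)), if_pos hc,
            Nat.sub_self, List.take_zero, List.append_nil]
          exact ih (i+2) (out ++ [ns]) (by omega)
        · have hcA : ¬ (i < word.length - 1 ∧ word.getD i 0 = a ∧ word.getD (i+1) 0 = b) := by tauto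
          simp only [hi, dif_pos, if_neg hcA, if_neg hc, Nat.sub_self, List.take_zero,
            List.append_nil]
          exact ih (i+1) (out ++ [word.getD i 0]) (by omega)
      · have hcA : ¬ (i < word.length - 1 ∧ word.getD i 0 = a ∧ word.getD (i+1) 0 = b) := by tauto
        rw [pvLoopB_skip word a b ns i out hi ha, pvLoopA.eq_def]
        simp only [hi, dif_pos, if_neg hcA]
        exact ih (i+1) (out ++ [word.getD i 0]) (by omega)
    · have hf : pvIndexFrom word a i = none := by rw [pvIndexFrom, dif_neg hi]
      rw [pvLoopA.eq_def, pvLoopB.eq_def, hf]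
      simp [hi, List.drop_eq_nil_of_le (by omega : word.length ≤ i)]

-- ===== VERDICT (by name: the statement is the Claim_ definition above) =====
theorem merge_pair_in_word_spec : Claim_equal_merge_pair_in_word := by
  intro word pair ns _
  unfold Spec_merge_pair_in_word merge_pair_in_word merge_pair_in_word_alt
  exact loops_eq word pair.1 pair.2 ns word.length 0 [] (by omega)
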